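-- pv_equiv track=rewrite | github.com/DakikSoftwareTechnologies/AnomalyGenerator | geneval.py | temporal_distance
-- ===== SOURCE A (Python) =====
-- def temporal_distance(target, candidate):
--     ttc = 0
--     for i, tp in enumerate(target):
--         if tp == 1:
--             closest = len(target)
--             for j, cp in enumerate(candidate):
--                 if cp == 1:
--                     if abs(i - j) < closest:
--                         closest = abs(i - j)
--             ttc += closest
--
--     ctt = 0
--     for j, cp in enumerate(candidate):
--         if cp == 1:
--             closest = len(candidate)
--             for i, tp in enumerate(target):
--                 if tp == 1:
--                     if abs(i - j) < closest:
--                         closest = abs(i - j)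
--             ctt += closest
--
--     return ttc + ctt
-- ===== SOURCE B (Python) =====
-- def _bisect_left(a, x):
--     # standard bisect_left (no imports allowed since A imports nothing)
--     lo, hi = 0, len(a)
--     while lo < hi:
--         mid = (lo + hi) // 2
--         if a[mid] < x:
--             lo = mid + 1
--         else:
--             hi = mid
--     return lo
--
--
-- def _nearest(ones, q, default):
--     # distance from q to the nearest element of the sorted list `ones`
--     if not ones:
--         return default
--     k = _bisect_left(ones, q)
--     best = None
--     if k < len(ones):
--         best = ones[k] - q
--     if k > 0 and (best is None or q - ones[k - 1] < best):
--         best = q - ones[k - 1]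
--     return best
--
--
-- def _side(queries, ones, default):
--     total = 0
--     for q in queries:
--         total += _nearest(ones, q, default)
--     return total
--
--
-- def temporal_distance(target, candidate):
--     pt = [i for i, v in enumerate(target) if v == 1]
--     pc = [j for j, v in enumerate(candidate) if v == 1]
--     return _side(pt, pc, len(target)) + _side(pc, pt, len(candidate))
-- ===== Notes on version B (the rewrite author's own statement) =====
-- stated objective: alternative
-- what changed: B extracts the sorted lists of 1-positions once and answers each nearest-neighbour query by binary search over them, instead of A's rescan of the whole other list for every 1.
-- intended difference: On inputs where some 1 in one list has its nearest 1 in the other list farther away than that loop's length sentinel (only possible when the lists have very different lengths), A returns the distance capped at len(...) — an artefact of initialising closest = len(...) as infinity — while B returns the true nearest-neighbour distance, which is the intended value. — e.g. on temporal_distance([1], [0, 0, 1]): A returns 3, B returns 4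
import Mathlib
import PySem

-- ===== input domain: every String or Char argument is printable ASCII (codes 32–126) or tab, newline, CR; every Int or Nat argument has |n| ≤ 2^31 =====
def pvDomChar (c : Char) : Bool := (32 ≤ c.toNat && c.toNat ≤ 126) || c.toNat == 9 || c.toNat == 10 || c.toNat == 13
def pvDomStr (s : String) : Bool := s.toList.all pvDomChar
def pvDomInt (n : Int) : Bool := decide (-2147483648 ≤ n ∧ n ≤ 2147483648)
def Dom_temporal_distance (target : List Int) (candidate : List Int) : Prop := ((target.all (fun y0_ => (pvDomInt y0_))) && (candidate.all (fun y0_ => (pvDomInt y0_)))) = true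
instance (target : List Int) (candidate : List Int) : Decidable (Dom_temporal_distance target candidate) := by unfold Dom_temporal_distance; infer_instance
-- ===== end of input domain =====

-- B replaces A's nested scans by sorted 1-position lists queried with binary search;
-- on inputs where A's sentinel `closest = len(...)` silently caps a real nearest-neighbour distance, B returns
-- the true distance (stated as the intended difference D_ below).

-- ===== PORT A =====
def temporal_distance (target : List Int) (candidate : List Int) : Int :=
  let ttc : Int :=
    (PySem.List.enumerate target).foldl (fun (acc : Int) (p : Int × Int) =>
      if p.2 == 1 then
        acc + ((PySem.List.enumerate candidate).foldl (fun (closest : Int) (q : Int × Int) =>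
          if q.2 == 1 then (if |p.1 - q.1| < closest then |p.1 - q.1| else closest) else closest)
          (target.length : Int))
      else acc) 0
  let ctt : Int :=
    (PySem.List.enumerate candidate).foldl (fun (acc : Int) (p : Int × Int) =>
      if p.2 == 1 then
        acc + ((PySem.List.enumerate target).foldl (fun (closest : Int) (q : Int × Int) =>
          if q.2 == 1 then (if |q.1 - p.1| < closest then |q.1 - p.1| else closest) else closest)
          (candidate.length : Int))
      else acc) 0
  ttc + ctt

-- ===== PORT B =====
-- _bisect_left in Source B is the standard bisect_left lo/hi loop; PySem.List.bisectLeft is that same loop.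
-- _nearest: distance from q to the nearest element of the sorted list `ones` (default if `ones` is empty).
def pvNearest (ones : List Int) (q : Int) (default : Int) : Int :=
  if ones = [] then default
  else
    let k := PySem.List.bisectLeft ones q
    let best : Option Int :=
      if k < ones.length then some (PySem.List.pyGetD ones (k : Int) 0 - q) else none
    let best2 : Option Int :=
      match best with
      | none => if 0 < k then some (q - PySem.List.pyGetD ones ((k : Int) - 1) 0) else best
      | some b =>
          if 0 < k ∧ q - PySem.List.pyGetD ones ((k : Int) - 1) 0 < b then
            some (q - PySem.List.pyGetD ones ((k : Int) - 1) 0)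
          else best
    best2.getD default  -- best2 is always `some` when ones ≠ []; getD only totalizes

def pvSide (queries : List Int) (ones : List Int) (default : Int) : Int :=
  queries.foldl (fun total q => total + pvNearest ones q default) 0

def temporal_distance_alt (target : List Int) (candidate : List Int) : Int :=
  let pt := ((PySem.List.enumerate target).filter (fun p => p.2 == 1)).map (fun p => p.1)
  let pc := ((PySem.List.enumerate candidate).filter (fun p => p.2 == 1)).map (fun p => p.1)
  pvSide pt pc (target.length : Int) + pvSide pc pt (candidate.length : Int)

-- ===== PRECONDITION & SPEC =====
-- On inputs where one list contains a 1 whose nearest 1 in the other list is farther away than that other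
-- iteration's length sentinel, A returns the sentinel-capped distance (an artefact of initialising
-- `closest = len(...)`), while B returns the true nearest-neighbour distance, which is the intended value.
def D_temporal_distance (target : List Int) (candidate : List Int) : Prop :=
  ((∃ q ∈ PySem.List.enumerate candidate, q.2 = 1) ∧
     ∃ p ∈ PySem.List.enumerate target, p.2 = 1 ∧
       ∀ q ∈ PySem.List.enumerate candidate, q.2 = 1 → (target.length : Int) < |p.1 - q.1|) ∨
  ((∃ p ∈ PySem.List.enumerate target, p.2 = 1) ∧
     ∃ q ∈ PySem.List.enumerate candidate, q.2 = 1 ∧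
       ∀ p ∈ PySem.List.enumerate target, p.2 = 1 → (candidate.length : Int) < |p.1 - q.1|)
instance (target : List Int) (candidate : List Int) : Decidable (D_temporal_distance target candidate) := by
  unfold D_temporal_distance; infer_instance

def Spec_temporal_distance (target : List Int) (candidate : List Int) (out : Int) : Prop :=
  ¬ D_temporal_distance target candidate → out = temporal_distance_alt target candidate
instance (target : List Int) (candidate : List Int) (out : Int) : Decidable (Spec_temporal_distance target candidate out) := by
  unfold Spec_temporal_distance; infer_instance

def pvDiffWitness_temporal_distance : List Int × List Int := ([1], [0, 0, 1])
def pvDiffWitnessOut_temporal_distance : Int × Int := (3, 4)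

-- ===== CLAIM (what is proved, stated in full; the proofs are below) =====
def Claim_unchanged_temporal_distance : Prop := ∀ (target : List Int) (candidate : List Int), Dom_temporal_distance target candidate → Spec_temporal_distance target candidate (temporal_distance target candidate)
def Claim_changed_temporal_distance : Prop := Dom_temporal_distance (pvDiffWitness_temporal_distance.1) (pvDiffWitness_temporal_distance.2) ∧ D_temporal_distance (pvDiffWitness_temporal_distance.1) (pvDiffWitness_temporal_distance.2) ∧ temporal_distance (pvDiffWitness_temporal_distance.1) (pvDiffWitness_temporal_distance.2) = pvDiffWitnessOut_temporal_distance.1 ∧ temporal_distance_alt (pvDiffWitness_temporal_distance.1) (pvDiffWitness_temporal_distance.2) = pvDiffWitnessOut_temporal_distance.2 ∧ pvDiffWitnessOut_temporal_distance.1 ≠ pvDiffWitnessOut_temporal_distance.2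
def Claim_exact_temporal_distance : Prop := ∀ (target : List Int) (candidate : List Int), Dom_temporal_distance target candidate → D_temporal_distance target candidate → temporal_distance target candidate ≠ temporal_distance_alt target candidate

-- ===== LEMMAS AND PROOFS =====

def onesIdx (l : List Int) : List Int :=
  ((PySem.List.enumerate l).filter (fun p => p.2 == 1)).map (fun p => p.1)

lemma onesIdx_sorted (l : List Int) : (onesIdx l).Pairwise (· < ·) := by
  exact List.Pairwise.map _ (fun a b h => h)
    (List.Pairwise.filter _ (PySem.List.pairwise_lt_enumerate l 0))

lemma mem_onesIdx (l : List Int) (i : Int) :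
    i ∈ onesIdx l ↔ ∃ p ∈ PySem.List.enumerate l, p.2 = 1 ∧ p.1 = i := by
  simp [onesIdx, List.mem_filter]

lemma innerA_eq (Y : List Int) (n : Int) (i : Int) (dfn : Int → Int → Int) :
    (PySem.List.enumerate Y).foldl (fun (closest : Int) (q : Int × Int) =>
        if q.2 == 1 then (if dfn i q.1 < closest then dfn i q.1 else closest) else closest) n
    = ((onesIdx Y).map (fun j => dfn i j)).foldl min n := by
  have h := PySem.List.foldl_if_eq_foldl_filter (fun (q : Int × Int) => q.2 == 1)
    (fun (closest : Int) (q : Int × Int) => if dfn i q.1 < closest then dfn i q.1 else closest)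
    (PySem.List.enumerate Y) n
  rw [h, onesIdx, List.map_map, List.foldl_map]
  apply PySem.List.foldl_congr_mem
  intro acc x _
  simp [min_def]
  split_ifs <;> omega

lemma sideA_eq (X Y : List Int) (n : Int) (dfn : Int → Int → Int) :
    (PySem.List.enumerate X).foldl (fun (acc : Int) (p : Int × Int) =>
        if p.2 == 1 then
          acc + ((PySem.List.enumerate Y).foldl (fun (closest : Int) (q : Int × Int) =>
            if q.2 == 1 then (if dfn p.1 q.1 < closest then dfn p.1 q.1 else closest) else closest) n)
        else acc) 0
    = ((onesIdx X).map (fun i => ((onesIdx Y).map (fun j => dfn i j)).foldl min n)).sum := by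
  have h1 : ∀ (acc : Int), ∀ p ∈ PySem.List.enumerate X,
      (if p.2 == 1 then acc + ((PySem.List.enumerate Y).foldl (fun (closest : Int) (q : Int × Int) =>
            if q.2 == 1 then (if dfn p.1 q.1 < closest then dfn p.1 q.1 else closest) else closest) n)
        else acc)
      = (if p.2 == 1 then acc + ((onesIdx Y).map (fun j => dfn p.1 j)).foldl min n else acc) := by
    intro acc p _; rw [innerA_eq]
  rw [PySem.List.foldl_congr_mem _ _ _ _ h1]
  have h2 := PySem.List.foldl_if_eq_foldl_filter (fun (p : Int × Int) => p.2 == 1)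
    (fun (acc : Int) (p : Int × Int) => acc + ((onesIdx Y).map (fun j => dfn p.1 j)).foldl min n)
    (PySem.List.enumerate X) 0
  rw [h2, PySem.List.foldl_add _ (fun (p : Int × Int) => ((onesIdx Y).map (fun j => dfn p.1 j)).foldl min n)]
  simp [onesIdx, List.map_map, Function.comp_def]

lemma sideB_eq (X Y : List Int) (n : Int) :
    pvSide (onesIdx X) (onesIdx Y) n
    = ((onesIdx X).map (fun i => pvNearest (onesIdx Y) i n)).sum := by
  unfold pvSide
  rw [PySem.List.foldl_add]
  simp

lemma foldl_min_props (l : List Int) (init : Int) :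
    l.foldl min init ≤ init ∧ (∀ x ∈ l, l.foldl min init ≤ x) ∧
      (l.foldl min init = init ∨ l.foldl min init ∈ l) := by
  induction l generalizing init with
  | nil => simp
  | cons a t ih =>
    obtain ⟨h1, h2, h3⟩ := ih (min init a)
    refine ⟨le_trans h1 (min_le_left _ _), ?_, ?_⟩
    · intro x hx
      rcases List.mem_cons.1 hx with rfl | hx
      · exact le_trans h1 (min_le_right _ _)
      · exact h2 x hx
    · rcases h3 with h | h
      · rcases le_total init a with hle | hle
        · left; rw [List.foldl_cons, h, min_eq_left hle]
        · right; rw [List.foldl_cons, h, min_eq_right hle]; exact List.mem_cons_self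
      · right; rw [List.foldl_cons]; exact List.mem_cons_of_mem _ h

lemma getElem_mono (ones : List Int) (hs : ones.Pairwise (· < ·)) {i j : Nat} (hij : i ≤ j)
    (hj : j < ones.length) : ones[i]'(lt_of_le_of_lt hij hj) ≤ ones[j] := by
  rcases lt_or_eq_of_le hij with h | h
  · exact le_of_lt (List.pairwise_iff_getElem.1 hs i j _ hj h)
  · subst h; exact le_refl _

lemma pvNearest_min' (ones : List Int) (q d : Int) (hs : ones.Pairwise (· < ·)) (hne : ones ≠ []) :
    pvNearest ones q d ∈ ones.map (fun j => |q - j|) ∧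
      ∀ x ∈ ones.map (fun j => |q - j|), pvNearest ones q d ≤ x := by
  obtain ⟨hkle, hlt, hge⟩ := PySem.List.bisectLeft_spec ones q (hs.imp (fun h => le_of_lt h))
  set k := PySem.List.bisectLeft ones q with hkdef
  have hlen : 0 < ones.length := List.length_pos_iff.2 hne
  by_cases hkl : k < ones.length
  · have hR : PySem.List.pyGetD ones (k : Int) 0 = ones[k] := by
      rw [PySem.List.pyGetD_natCast, List.getD_eq_getElem]
    have hRq : q ≤ ones[k] := hge k hkl (le_refl _)
    have aR : |q - ones[k]| = ones[k] - q := by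
      rw [abs_sub_comm]; exact abs_of_nonneg (by omega)
    by_cases hk0 : 0 < k
    · have hk1 : k - 1 < ones.length := by omega
      have hL : PySem.List.pyGetD ones ((k : Int) - 1) 0 = ones[k-1] := by
        have hc : ((k : Int) - 1) = ((k - 1 : Nat) : Int) := by omega
        rw [hc, PySem.List.pyGetD_natCast, List.getD_eq_getElem]
      have hLq : ones[k-1] < q := hlt (k-1) hk1 (by omega)
      have aL : |q - ones[k-1]| = q - ones[k-1] := abs_of_nonneg (by omega)
      have hval : pvNearest ones q d
          = if q - ones[k-1] < ones[k] - q then q - ones[k-1] else ones[k] - q := by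
        simp only [pvNearest, if_neg hne, ← hkdef, if_pos hkl, hR, hL]
        simp [hk0]
        split_ifs <;> rfl
      constructor
      · rw [hval]; split_ifs with h
        · exact List.mem_map.mpr ⟨ones[k-1], List.getElem_mem hk1, aL⟩
        · exact List.mem_map.mpr ⟨ones[k], List.getElem_mem hkl, aR⟩
      · intro x hx
        obtain ⟨o, ho, rfl⟩ := List.mem_map.1 hx
        obtain ⟨j, hj, rfl⟩ := List.mem_iff_getElem.1 ho
        by_cases hjk : j < k
        · have h1 : ones[j] ≤ ones[k-1] := getElem_mono ones hs (by omega) hk1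
          have h2 : ones[j] < q := hlt j hj hjk
          have ha : |q - ones[j]| = q - ones[j] := abs_of_nonneg (by omega)
          rw [hval, ha]; split_ifs with h <;> omega
        · have h1 : ones[k] ≤ ones[j] := getElem_mono ones hs (by omega) hj
          have ha : |q - ones[j]| = ones[j] - q := by
            rw [abs_sub_comm]; exact abs_of_nonneg (by omega)
          rw [hval, ha]; split_ifs with h <;> omega
    · have hk00 : k = 0 := by omega
      have hval : pvNearest ones q d = ones[k] - q := by
        simp only [pvNearest, if_neg hne, ← hkdef, if_pos hkl, hR]
        simp [hk00]
      constructor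
      · rw [hval]; exact List.mem_map.mpr ⟨ones[k], List.getElem_mem hkl, aR⟩
      · intro x hx
        obtain ⟨o, ho, rfl⟩ := List.mem_map.1 hx
        obtain ⟨j, hj, rfl⟩ := List.mem_iff_getElem.1 ho
        have h1 : ones[k] ≤ ones[j] := getElem_mono ones hs (by omega) hj
        have ha : |q - ones[j]| = ones[j] - q := by
          rw [abs_sub_comm]; exact abs_of_nonneg (by omega)
        rw [hval, ha]; omega
  · have hkeq : k = ones.length := by omega
    have hk0 : 0 < k := by omega
    have hk1 : k - 1 < ones.length := by omega
    have hL : PySem.List.pyGetD ones ((k : Int) - 1) 0 = ones[k-1] := by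
      have hc : ((k : Int) - 1) = ((k - 1 : Nat) : Int) := by omega
      rw [hc, PySem.List.pyGetD_natCast, List.getD_eq_getElem]
    have hLq : ones[k-1] < q := hlt (k-1) hk1 (by omega)
    have aL : |q - ones[k-1]| = q - ones[k-1] := abs_of_nonneg (by omega)
    have hval : pvNearest ones q d = q - ones[k-1] := by
      simp only [pvNearest, if_neg hne, ← hkdef, if_neg hkl, hL]
      simp [hk0]
    constructor
    · rw [hval]; exact List.mem_map.mpr ⟨ones[k-1], List.getElem_mem hk1, aL⟩
    · intro x hx
      obtain ⟨o, ho, rfl⟩ := List.mem_map.1 hx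
      obtain ⟨j, hj, rfl⟩ := List.mem_iff_getElem.1 ho
      have h1 : ones[j] ≤ ones[k-1] := getElem_mono ones hs (by omega) hk1
      have h2 : ones[j] < q := hlt j hj (by omega)
      have ha : |q - ones[j]| = q - ones[j] := abs_of_nonneg (by omega)
      rw [hval, ha]; omega

lemma minfold_eq_nearest (ones : List Int) (q n : Int) (hs : ones.Pairwise (· < ·))
    (h : ones = [] ∨ ∃ j ∈ ones, |q - j| ≤ n) :
    ((ones.map (fun j => |q - j|)).foldl min n) = pvNearest ones q n := by
  rcases h with rfl | ⟨j, hj, hjn⟩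
  · simp [pvNearest]
  · have hne : ones ≠ [] := List.ne_nil_of_mem hj
    obtain ⟨hmem, hlb⟩ := pvNearest_min' ones q n hs hne
    obtain ⟨hinit, hall, hcase⟩ := foldl_min_props (ones.map (fun j => |q - j|)) n
    apply le_antisymm
    · exact hall _ hmem
    · rcases hcase with hcc | hcc
      · rw [hcc]
        exact le_trans (hlb _ (List.mem_map.mpr ⟨j, hj, rfl⟩)) hjn
      · exact hlb _ hcc

lemma minfold_le_nearest (ones : List Int) (q n : Int) (hs : ones.Pairwise (· < ·)) :
    ((ones.map (fun j => |q - j|)).foldl min n) ≤ pvNearest ones q n := by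
  by_cases hne : ones = []
  · subst hne; simp [pvNearest]
  · obtain ⟨hmem, _⟩ := pvNearest_min' ones q n hs hne
    exact (foldl_min_props (ones.map (fun j => |q - j|)) n).2.1 _ hmem

lemma minfold_lt_nearest (ones : List Int) (q n : Int) (hs : ones.Pairwise (· < ·))
    (hne : ones ≠ []) (h : ∀ j ∈ ones, n < |q - j|) :
    ((ones.map (fun j => |q - j|)).foldl min n) < pvNearest ones q n := by
  obtain ⟨hmem, _⟩ := pvNearest_min' ones q n hs hne
  obtain ⟨j0, hj0, hj0e⟩ := List.mem_map.1 hmem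
  exact lt_of_le_of_lt (foldl_min_props (ones.map (fun j => |q - j|)) n).1
    (hj0e ▸ h j0 hj0)

-- the two ports as sums over the 1-position lists
lemma A_eq_sums (target candidate : List Int) :
    temporal_distance target candidate
    = ((onesIdx target).map (fun i =>
          ((onesIdx candidate).map (fun j => |i - j|)).foldl min (target.length : Int))).sum
      + ((onesIdx candidate).map (fun i =>
          ((onesIdx target).map (fun j => |j - i|)).foldl min (candidate.length : Int))).sum := by
  show (PySem.List.enumerate target).foldl _ 0 + (PySem.List.enumerate candidate).foldl _ 0 = _
  rw [sideA_eq target candidate (target.length : Int) (fun a b => |a - b|),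
      sideA_eq candidate target (candidate.length : Int) (fun a b => |b - a|)]

lemma B_eq_sums (target candidate : List Int) :
    temporal_distance_alt target candidate
    = ((onesIdx target).map (fun i => pvNearest (onesIdx candidate) i (target.length : Int))).sum
      + ((onesIdx candidate).map (fun i => pvNearest (onesIdx target) i (candidate.length : Int))).sum := by
  show pvSide (onesIdx target) (onesIdx candidate) _ + pvSide (onesIdx candidate) (onesIdx target) _ = _
  rw [sideB_eq target candidate, sideB_eq candidate target]

-- ¬ D_ gives, on each side, a 1 within range (or no 1s at all)
lemma not_D_side1 (target candidate : List Int)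
    (hnd : ¬ D_temporal_distance target candidate) (i : Int) (hi : i ∈ onesIdx target) :
    onesIdx candidate = [] ∨ ∃ j ∈ onesIdx candidate, |i - j| ≤ (target.length : Int) := by
  by_cases hc : onesIdx candidate = []
  · exact Or.inl hc
  · right
    obtain ⟨jc, hjc⟩ := List.exists_mem_of_ne_nil _ hc
    obtain ⟨qc, hqc, hqc1, _⟩ := (mem_onesIdx candidate jc).1 hjc
    obtain ⟨p, hp, hp1, hpi⟩ := (mem_onesIdx target i).1 hi
    unfold D_temporal_distance at hnd
    push Not at hnd
    obtain ⟨q, hq, hq1, hqle⟩ := hnd.1 ⟨qc, hqc, hqc1⟩ p hp hp1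
    exact ⟨q.1, (mem_onesIdx candidate q.1).2 ⟨q, hq, hq1, rfl⟩, by rw [← hpi]; omega⟩

lemma not_D_side2 (target candidate : List Int)
    (hnd : ¬ D_temporal_distance target candidate) (i : Int) (hi : i ∈ onesIdx candidate) :
    onesIdx target = [] ∨ ∃ j ∈ onesIdx target, |i - j| ≤ (candidate.length : Int) := by
  by_cases ht : onesIdx target = []
  · exact Or.inl ht
  · right
    obtain ⟨jt, hjt⟩ := List.exists_mem_of_ne_nil _ ht
    obtain ⟨pt, hpt, hpt1, _⟩ := (mem_onesIdx target jt).1 hjt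
    obtain ⟨q, hq, hq1, hqi⟩ := (mem_onesIdx candidate i).1 hi
    unfold D_temporal_distance at hnd
    push Not at hnd
    obtain ⟨p, hp, hp1, hple⟩ := hnd.2 ⟨pt, hpt, hpt1⟩ q hq hq1
    exact ⟨p.1, (mem_onesIdx target p.1).2 ⟨p, hp, hp1, rfl⟩, by rw [← hqi, abs_sub_comm]; omega⟩

-- ===== VERDICT (by name: the statement is the Claim_ definition above) =====
theorem temporal_distance_spec : Claim_unchanged_temporal_distance := by
  intro target candidate _ hnd
  rw [A_eq_sums, B_eq_sums]
  congr 1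
  · apply congrArg List.sum
    apply List.map_congr_left
    intro i hi
    exact minfold_eq_nearest (onesIdx candidate) i _ (onesIdx_sorted candidate)
      (not_D_side1 target candidate hnd i hi)
  · apply congrArg List.sum
    apply List.map_congr_left
    intro i hi
    have hmc : ((onesIdx target).map (fun j => |j - i|))
        = ((onesIdx target).map (fun j => |i - j|)) :=
      List.map_congr_left (fun j _ => abs_sub_comm j i)
    rw [hmc]
    exact minfold_eq_nearest (onesIdx target) i _ (onesIdx_sorted target)
      (not_D_side2 target candidate hnd i hi)

theorem temporal_distance_changed : Claim_changed_temporal_distance := by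
  unfold Claim_changed_temporal_distance; decide

theorem temporal_distance_tight : Claim_exact_temporal_distance := by
  intro target candidate _ hd
  rw [A_eq_sums, B_eq_sums]
  have hle1 : ∀ i ∈ onesIdx target,
      ((onesIdx candidate).map (fun j => |i - j|)).foldl min (target.length : Int)
        ≤ pvNearest (onesIdx candidate) i (target.length : Int) :=
    fun i _ => minfold_le_nearest _ i _ (onesIdx_sorted candidate)
  have hle2 : ∀ i ∈ onesIdx candidate,
      ((onesIdx target).map (fun j => |j - i|)).foldl min (candidate.length : Int)
        ≤ pvNearest (onesIdx target) i (candidate.length : Int) := by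
    intro i _
    have hmc : ((onesIdx target).map (fun j => |j - i|))
        = ((onesIdx target).map (fun j => |i - j|)) :=
      List.map_congr_left (fun j _ => abs_sub_comm j i)
    rw [hmc]
    exact minfold_le_nearest _ i _ (onesIdx_sorted target)
  rcases hd with ⟨⟨qc, hqc, hqc1⟩, p, hp, hp1, hfar⟩ | ⟨⟨pt, hpt, hpt1⟩, q, hq, hq1, hfar⟩
  · -- strict on side 1
    have hne : onesIdx candidate ≠ [] :=
      List.ne_nil_of_mem ((mem_onesIdx candidate qc.1).2 ⟨qc, hqc, hqc1, rfl⟩)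
    have hlt : ((onesIdx candidate).map (fun j => |p.1 - j|)).foldl min (target.length : Int)
        < pvNearest (onesIdx candidate) p.1 (target.length : Int) := by
      apply minfold_lt_nearest _ _ _ (onesIdx_sorted candidate) hne
      intro j hj
      obtain ⟨q, hqm, hq1, hqj⟩ := (mem_onesIdx candidate j).1 hj
      rw [← hqj]
      exact hfar q hqm hq1
    have h1 : (((onesIdx target).map (fun i =>
        ((onesIdx candidate).map (fun j => |i - j|)).foldl min (target.length : Int))).sum
        < ((onesIdx target).map (fun i =>
            pvNearest (onesIdx candidate) i (target.length : Int))).sum) :=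
      List.sum_lt_sum _ _ hle1 ⟨p.1, (mem_onesIdx target p.1).2 ⟨p, hp, hp1, rfl⟩, hlt⟩
    have h2 := List.sum_le_sum hle2
    omega
  · -- strict on side 2
    have hne : onesIdx target ≠ [] :=
      List.ne_nil_of_mem ((mem_onesIdx target pt.1).2 ⟨pt, hpt, hpt1, rfl⟩)
    have hlt : ((onesIdx target).map (fun j => |j - q.1|)).foldl min (candidate.length : Int)
        < pvNearest (onesIdx target) q.1 (candidate.length : Int) := by
      have hmc : ((onesIdx target).map (fun j => |j - q.1|))
          = ((onesIdx target).map (fun j => |q.1 - j|)) :=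
        List.map_congr_left (fun j _ => abs_sub_comm j q.1)
      rw [hmc]
      apply minfold_lt_nearest _ _ _ (onesIdx_sorted target) hne
      intro j hj
      obtain ⟨p, hpm, hp1, hpj⟩ := (mem_onesIdx target j).1 hj
      rw [← hpj, abs_sub_comm]
      exact hfar p hpm hp1
    have h2 : (((onesIdx candidate).map (fun i =>
        ((onesIdx target).map (fun j => |j - i|)).foldl min (candidate.length : Int))).sum
        < ((onesIdx candidate).map (fun i =>
            pvNearest (onesIdx target) i (candidate.length : Int))).sum) :=
      List.sum_lt_sum _ _ hle2 ⟨q.1, (mem_onesIdx candidate q.1).2 ⟨q, hq, hq1, rfl⟩, hlt⟩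
    have h1 := List.sum_le_sum hle1
    omega
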